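-- pv_equiv track=rewrite | github.com/yuhasem/poc_utils | tas/rng.py | rngCommon
-- ===== SOURCE A (Python) =====
-- def rngCommon(seed, steps, muls, adds):
--     i = 0
--     while (steps > 0):
--         if (steps % 2):
--             seed = (seed * muls[i] + adds[i]) & 0xFFFFFFFF
--         steps >>= 1
--         i += 1
--         if (i > 32):
--             break
--     return seed
-- ===== SOURCE B (Python) =====
-- def rngCommon(seed, steps, muls, adds):
--     # Compose the selected affine steps into one map (mod 2**32), apply it once at the end.
--     m, a = 1, 0
--     applied = False
--     i = 0
--     while steps > 0 and i <= 32: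
--         if steps % 2:
--             m = (m * muls[i]) & 0xFFFFFFFF
--             a = (a * muls[i] + adds[i]) & 0xFFFFFFFF
--             applied = True
--         steps >>= 1
--         i += 1
--     return (seed * m + a) & 0xFFFFFFFF if applied else seed
-- ===== Notes on version B (the rewrite author's own statement) =====
-- stated objective: alternative
-- what changed: Instead of repeatedly updating the seed inside the bit loop, B folds the selected per-bit affine maps into one composed multiplier/addend (mod 2^32) and applies the combined map to the seed once at the end (an applied flag keeps the steps<=0 case returning the seed unmasked, as A does).
-- outside the precondition, e.g. on rngCommon(1, 2, [3], [4]): A raises IndexError, B raises IndexError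
import Mathlib
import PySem

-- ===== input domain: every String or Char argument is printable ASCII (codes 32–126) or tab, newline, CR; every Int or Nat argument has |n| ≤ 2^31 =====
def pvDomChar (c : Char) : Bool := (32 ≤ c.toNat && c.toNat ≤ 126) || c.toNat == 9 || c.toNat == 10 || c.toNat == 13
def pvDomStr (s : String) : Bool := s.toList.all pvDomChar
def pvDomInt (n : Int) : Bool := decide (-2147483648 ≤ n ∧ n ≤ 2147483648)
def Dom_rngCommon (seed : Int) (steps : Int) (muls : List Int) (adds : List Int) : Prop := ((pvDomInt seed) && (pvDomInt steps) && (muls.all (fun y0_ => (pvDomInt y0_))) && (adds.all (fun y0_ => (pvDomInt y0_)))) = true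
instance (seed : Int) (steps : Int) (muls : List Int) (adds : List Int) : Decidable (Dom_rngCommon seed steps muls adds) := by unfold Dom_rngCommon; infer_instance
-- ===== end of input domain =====

-- B composes the selected affine maps into one transform mod 2^32 and applies it to the seed
-- once at the end, instead of A's repeated in-loop seed updates (objective: alternative).

-- ===== PORT A =====
-- Literal port of A's while-loop: update seed in place for each set bit, break after i > 32.
def rngCommonA_loop (seed : Int) (steps : Int) (i : Nat) (muls : List Int) (adds : List Int) : Int :=
  if _h : 0 < steps then
    let seed' := if PySem.Int.mod steps 2 ≠ 0 then
        PySem.Int.band (seed * ((PySem.List.pyGet? muls (i : Int)).getD 0)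
            + ((PySem.List.pyGet? adds (i : Int)).getD 0)) 4294967295
      else seed
    if i + 1 > 32 then seed'
    else rngCommonA_loop seed' (steps >>> (1:Nat)) (i + 1) muls adds
  else seed
termination_by steps.toNat
decreasing_by
  rw [Int.shiftRight_eq_div_pow]; omega

def rngCommon (seed : Int) (steps : Int) (muls : List Int) (adds : List Int) : Int :=
  rngCommonA_loop seed steps 0 muls adds

-- ===== PORT B =====
-- Literal port of Source B's loop: accumulate the composed multiplier/addend (m, a) and a flag.
def rngCommonB_loop (steps : Int) (i : Nat) (m : Int) (a : Int) (applied : Bool)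
    (muls : List Int) (adds : List Int) : Int × Int × Bool :=
  if _h : 0 < steps ∧ i ≤ 32 then
    if PySem.Int.mod steps 2 ≠ 0 then
      rngCommonB_loop (steps >>> (1:Nat)) (i + 1)
        (PySem.Int.band (m * ((PySem.List.pyGet? muls (i : Int)).getD 0)) 4294967295)
        (PySem.Int.band (a * ((PySem.List.pyGet? muls (i : Int)).getD 0)
            + ((PySem.List.pyGet? adds (i : Int)).getD 0)) 4294967295)
        true muls adds
    else rngCommonB_loop (steps >>> (1:Nat)) (i + 1) m a applied muls adds
  else (m, a, applied)
termination_by steps.toNat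
decreasing_by
  all_goals (rw [Int.shiftRight_eq_div_pow]; omega)

def rngCommon_alt (seed : Int) (steps : Int) (muls : List Int) (adds : List Int) : Int :=
  let r := rngCommonB_loop steps 0 1 0 false muls adds
  if r.2.2 then PySem.Int.band (seed * r.1 + r.2.1) 4294967295 else seed

-- ===== PRECONDITION & SPEC =====
-- Pre_ excludes exactly the inputs where A raises IndexError: some bit i ≤ 32 of a positive
-- steps is set but muls or adds has no element at index i.
def Pre_rngCommon (seed : Int) (steps : Int) (muls : List Int) (adds : List Int) : Prop :=
  ∀ i ∈ List.range 33, (0 < steps >>> i ∧ PySem.Int.mod (steps >>> i) 2 = 1) →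
    i < muls.length ∧ i < adds.length
instance (seed : Int) (steps : Int) (muls : List Int) (adds : List Int) : Decidable (Pre_rngCommon seed steps muls adds) := by unfold Pre_rngCommon; infer_instance

def pvWitness_rngCommon : Int × Int × List Int × List Int := (1, 3, [5, 7], [11, 13])

def Spec_rngCommon (seed : Int) (steps : Int) (muls : List Int) (adds : List Int) (out : Int) : Prop := out = rngCommon_alt seed steps muls adds
instance (seed : Int) (steps : Int) (muls : List Int) (adds : List Int) (out : Int) : Decidable (Spec_rngCommon seed steps muls adds out) := by unfold Spec_rngCommon; infer_instance

-- ===== CLAIM (what is proved, stated in full; the proofs are below) =====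
def Claim_equal_rngCommon : Prop := ∀ (seed : Int) (steps : Int) (muls : List Int) (adds : List Int), Dom_rngCommon seed steps muls adds → Pre_rngCommon seed steps muls adds → Spec_rngCommon seed steps muls adds (rngCommon seed steps muls adds)

-- ===== LEMMAS AND PROOFS =====

theorem band_mask (x : Int) : PySem.Int.band x 4294967295 = x % 4294967296 := by
  have hb : ((0:Int) ≤ 4294967295) := by norm_num
  have hv : (4294967295:Int).toNat = 2^32 - 1 := by decide
  by_cases h : 0 ≤ x
  · simp only [PySem.Int.band, if_pos h, if_pos hb, hv, Nat.and_two_pow_sub_one_eq_mod]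
    omega
  · simp only [PySem.Int.band, if_neg h, if_pos hb, hv, Nat.and_comm,
      Nat.and_two_pow_sub_one_eq_mod]
    have := Nat.mod_lt (-x-1).toNat (show 0 < 2^32 by decide)
    omega

theorem emod_selfmod (x : Int) : x % 4294967296 ≡ x [ZMOD 4294967296] :=
  Int.emod_emod_of_dvd x dvd_rfl

theorem affine_comp (s m a mul ad : Int) :
    ((s * m + a) % 4294967296 * mul + ad) % 4294967296
      = (s * (m * mul % 4294967296) + (a * mul + ad) % 4294967296) % 4294967296 := by
  calc ((s * m + a) % 4294967296 * mul + ad) % 4294967296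
      = ((s * m + a) * mul + ad) % 4294967296 :=
        ((emod_selfmod _).mul_right mul).add_right ad
    _ = (s * (m * mul) + (a * mul + ad)) % 4294967296 := by ring_nf
    _ = (s * (m * mul % 4294967296) + (a * mul + ad) % 4294967296) % 4294967296 :=
        (((emod_selfmod _).mul_left s).add (emod_selfmod _)).symm

theorem affine_first (s mul ad : Int) :
    (s * mul + ad) % 4294967296
      = (s * (1 * mul % 4294967296) + (0 * mul + ad) % 4294967296) % 4294967296 := by
  calc (s * mul + ad) % 4294967296
      = (s * (1 * mul) + (0 * mul + ad)) % 4294967296 := by ring_nf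
    _ = (s * (1 * mul % 4294967296) + (0 * mul + ad) % 4294967296) % 4294967296 :=
        (((emod_selfmod _).mul_left s).add (emod_selfmod _)).symm

theorem loop_agree (n : Nat) : ∀ (steps : Int) (i : Nat) (m a seed0 seedA : Int)
    (applied : Bool) (muls adds : List Int),
    steps.toNat ≤ n → i ≤ 32 →
    (if applied then seedA = PySem.Int.band (seed0 * m + a) 4294967295
      else seedA = seed0 ∧ m = 1 ∧ a = 0) →
    rngCommonA_loop seedA steps i muls adds =
      (let r := rngCommonB_loop steps i m a applied muls adds
       if r.2.2 then PySem.Int.band (seed0 * r.1 + r.2.1) 4294967295 else seed0) := by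
  induction n with
  | zero =>
    intro steps i m a seed0 seedA applied muls adds hn _hi hinv
    have hs : ¬ 0 < steps := by omega
    rw [rngCommonA_loop.eq_def, rngCommonB_loop.eq_def]
    simp only [hs, false_and, dite_false]
    cases applied with
    | false => rw [if_neg (by decide)] at hinv; simpa using hinv.1
    | true => rw [if_pos rfl] at hinv; simpa using hinv
  | succ n ih =>
    intro steps i m a seed0 seedA applied muls adds hn hi hinv
    by_cases hs : 0 < steps
    · have hn' : (steps >>> (1:Nat)).toNat ≤ n := by
        rw [Int.shiftRight_eq_div_pow]; omega
      set mul := (PySem.List.pyGet? muls (i : Int)).getD 0 with hmul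
      set ad := (PySem.List.pyGet? adds (i : Int)).getD 0 with had
      by_cases hbit : PySem.Int.mod steps 2 ≠ 0
      · -- bit set: both apply the affine step, invariant re-established with applied' = true
        have hinv' : PySem.Int.band (seedA * mul + ad) 4294967295 =
            PySem.Int.band (seed0 * (PySem.Int.band (m * mul) 4294967295)
              + PySem.Int.band (a * mul + ad) 4294967295) 4294967295 := by
          cases applied with
          | true =>
            rw [if_pos rfl] at hinv
            rw [hinv]
            simp only [band_mask]
            exact affine_comp seed0 m a mul ad
          | false =>
            rw [if_neg (by decide)] at hinv
            obtain ⟨h1, h2, h3⟩ := hinv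
            subst h1; subst h2; subst h3
            simp only [band_mask]
            simpa using affine_first seedA mul ad
        by_cases hbrk : i + 1 > 32
        · -- i = 32: A breaks after this step; B's next iteration fails its guard
          have hne : ¬ (0 < steps >>> (1:Nat) ∧ i + 1 ≤ 32) := by omega
          rw [rngCommonA_loop.eq_def, rngCommonB_loop.eq_def]
          simp only [hs, dite_true, true_and, hi, if_pos hbit, if_pos hbrk, ← hmul, ← had]
          rw [rngCommonB_loop.eq_def]
          simp only [hne, dite_false, if_true]
          exact hinv'
        · rw [rngCommonA_loop.eq_def, rngCommonB_loop.eq_def]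
          simp only [hs, dite_true, true_and, hi, if_pos hbit, if_neg hbrk, ← hmul, ← had]
          exact ih (steps >>> (1:Nat)) (i + 1) _ _ seed0 _ true muls adds hn' (by omega)
            (by simp only [if_true]; exact hinv')
      · -- bit clear: both merely shift and advance
        by_cases hbrk : i + 1 > 32
        · have hne : ¬ (0 < steps >>> (1:Nat) ∧ i + 1 ≤ 32) := by omega
          rw [rngCommonA_loop.eq_def, rngCommonB_loop.eq_def]
          simp only [hs, dite_true, true_and, hi, if_neg hbit, if_pos hbrk]
          rw [rngCommonB_loop.eq_def]
          simp only [hne, dite_false]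
          cases applied with
          | false =>
            rw [if_neg (by decide)] at hinv
            simpa using hinv.1
          | true =>
            rw [if_pos rfl] at hinv
            simpa using hinv
        · rw [rngCommonA_loop.eq_def, rngCommonB_loop.eq_def]
          simp only [hs, dite_true, true_and, hi, if_neg hbit, if_neg hbrk]
          exact ih (steps >>> (1:Nat)) (i + 1) m a seed0 seedA applied muls adds hn' (by omega) hinv
    · rw [rngCommonA_loop.eq_def, rngCommonB_loop.eq_def]
      simp only [hs, false_and, dite_false]
      cases applied with
      | false => rw [if_neg (by decide)] at hinv; simpa using hinv.1
      | true => rw [if_pos rfl] at hinv; simpa using hinv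

-- ===== VERDICT (by name: the statement is the Claim_ definition above) =====
theorem rngCommon_spec : Claim_equal_rngCommon := by
  intro seed steps muls adds _hd _hp
  unfold Spec_rngCommon rngCommon rngCommon_alt
  exact loop_agree steps.toNat steps 0 1 0 seed seed false muls adds le_rfl (by omega)
    (by simp)
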